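-- pv_equiv track=rewrite | github.com/mode/blog | 2014-01-08 Top 100/billboard_scraper.py | split_loop
-- ===== SOURCE A (Python) =====
-- def split_artist(artist):
--
--     if artist != artist.split(" feat. ")[0]:
--         a = artist.split(" feat. ")
--
--     elif artist != artist.split(", ")[0]:
--         a = artist.split(", ")
--
--     elif artist != artist.split(" or ")[0]:
--         a = artist.split(" or ")
--
--     else:
--         a = artist.split(" and ")
--
--     return a
--
-- def split_loop(artist_array):
--
--     new_array = artist_array
--     len_old = len(artist_array)
--     len_new = 0
--
--     while len_old != len_new:
--
--         artist_array = new_array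
--         new_array = []
--
--         for a in artist_array:
--             new_artists = split_artist(a)
--             for n in new_artists:
--                 new_array.append(n)
--
--         len_new = len(new_array)
--         len_old = len(artist_array)
--
--     return new_array
-- ===== SOURCE B (Python) =====
-- # B: iterative worklist that fully expands each name by splitting at the FIRST
-- # occurrence of the highest-priority delimiter (priority: " feat. ", ", ", " or ", " and "),
-- # instead of A's repeated whole-array rebuild-and-rescan passes until the length stabilises.
--
-- def split_loop(artist_array):
--     out = []
--     stack = list(reversed(artist_array))
--     while stack:
--         s = stack.pop()
--         for sep in (" feat. ", ", ", " or ", " and "):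
--             i = s.find(sep)
--             if i != -1:
--                 stack.append(s[i + len(sep):])
--                 stack.append(s[:i])
--                 break
--         else:
--             out.append(s)
--     return out
-- ===== Notes on version B (the rewrite author's own statement) =====
-- stated objective: alternative
-- what changed: B replaces A's repeated whole-array rebuild-and-rescan passes (looping until the array length stabilises) with a single iterative worklist that fully expands each name by repeatedly splitting at the first occurrence of the highest-priority delimiter.
import Mathlib
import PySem

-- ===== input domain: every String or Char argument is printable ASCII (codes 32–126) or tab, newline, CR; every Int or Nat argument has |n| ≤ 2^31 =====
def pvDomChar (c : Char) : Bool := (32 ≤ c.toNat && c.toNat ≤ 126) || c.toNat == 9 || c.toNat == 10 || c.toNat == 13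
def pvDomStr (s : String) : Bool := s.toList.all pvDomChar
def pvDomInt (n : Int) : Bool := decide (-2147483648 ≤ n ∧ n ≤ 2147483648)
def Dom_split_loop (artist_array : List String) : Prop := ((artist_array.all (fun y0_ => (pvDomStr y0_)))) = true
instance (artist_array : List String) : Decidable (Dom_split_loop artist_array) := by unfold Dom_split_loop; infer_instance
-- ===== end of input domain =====

-- ===== PORT A =====
-- B replaces A's repeated whole-array rebuild-and-rescan passes (until the array length
-- stabilises) with one iterative worklist that fully expands each name by splitting at the
-- first occurrence of the highest-priority delimiter; alternative decomposition, same values.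
-- A-side helpers. The pv_* lemmas below are cited by splitLoopGo's termination proof
-- (a well-founded recursion), so they stay above the port.

theorem pv_go_spec (sep : List Char) (hsep : sep ≠ []) :
    ∀ (fuel : Nat) (l cur : List Char) (acc : List (List Char)), l.length < fuel →
    ∃ r : List (List Char), PySem.Chars.splitOn.go sep fuel l cur acc = acc.reverse ++ r ∧ r ≠ [] ∧
      PySem.Chars.join sep r = cur.reverse ++ l ∧ (sep <:+: l → 2 ≤ r.length) := by
  intro fuel
  induction fuel with
  | zero => intro l cur acc h; omega
  | succ fuel ih =>
    intro l cur acc h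
    cases l with
    | nil =>
      refine ⟨[cur.reverse], ?_, by simp, ?_, ?_⟩
      · rw [PySem.Chars.splitOn.go.eq_def]; simp
      · simp [PySem.Chars.join_singleton]
      · intro hin; exact absurd (List.eq_nil_of_infix_nil hin) hsep
    | cons c rest =>
      rw [PySem.Chars.splitOn.go.eq_def]
      by_cases hp : sep.isPrefixOf (c :: rest) = true
      · simp only [hp, if_true]
        obtain ⟨t, ht⟩ := List.isPrefixOf_iff_prefix.mp hp
        have hsl : 1 ≤ sep.length := by
          cases sep with | nil => exact absurd rfl hsep | cons a b => simp
        have hlen : (List.drop sep.length (c :: rest)).length < fuel := by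
          simp only [List.length_drop, List.length_cons]
          simp only [List.length_cons] at h; omega
        obtain ⟨r', h1, h2, h3, _⟩ := ih (List.drop sep.length (c :: rest)) [] (cur.reverse :: acc) hlen
        have hdrop : List.drop sep.length (c :: rest) = t := by rw [← ht, List.drop_left]
        refine ⟨cur.reverse :: r', ?_, by simp, ?_, ?_⟩
        · rw [h1]; simp
        · cases r' with
          | nil => exact absurd rfl h2
          | cons q rs =>
            rw [PySem.Chars.join_cons_cons, h3, hdrop]
            simp [← ht]
        · intro _
          cases r' with
          | nil => exact absurd rfl h2
          | cons q rs => simp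
      · simp only [hp]
        have hlen : rest.length < fuel := by simp only [List.length_cons] at h; omega
        obtain ⟨r, h1, h2, h3, h4⟩ := ih rest (c :: cur) acc hlen
        refine ⟨r, h1, h2, ?_, ?_⟩
        · rw [h3]; simp
        · intro hin
          apply h4
          obtain ⟨pre, suf, hps⟩ := hin
          cases pre with
          | nil =>
            exfalso; apply hp
            rw [List.isPrefixOf_iff_prefix]
            exact ⟨suf, by simpa using hps⟩
          | cons p ps =>
            have h2' : ps ++ (sep ++ suf) = rest :=
              (by simpa using hps : p = c ∧ ps ++ (sep ++ suf) = rest).2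
            exact ⟨ps, suf, by rw [List.append_assoc, h2']⟩

theorem pv_splitOn_spec (s sep : List Char) (hsep : sep ≠ []) :
    PySem.Chars.splitOn s sep ≠ [] ∧
    PySem.Chars.join sep (PySem.Chars.splitOn s sep) = s ∧
    (sep <:+: s → 2 ≤ (PySem.Chars.splitOn s sep).length) := by
  obtain ⟨r, h1, h2, h3, h4⟩ := pv_go_spec sep hsep (s.length + 1) s [] [] (by omega)
  unfold PySem.Chars.splitOn
  rw [h1]; simpa using ⟨h2, h3, h4⟩

theorem pv_sumLen_le_join (sep : List Char) :
    ∀ r : List (List Char), (r.map List.length).sum ≤ (PySem.Chars.join sep r).length := by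
  intro r
  induction r with
  | nil => simp [PySem.Chars.join_nil]
  | cons a rest ih =>
    cases rest with
    | nil => simp [PySem.Chars.join_singleton]
    | cons b rs =>
      rw [PySem.Chars.join_cons_cons]
      simp only [List.map_cons, List.sum_cons, List.length_append]
      have := ih
      simp only [List.map_cons, List.sum_cons] at this ⊢
      omega

theorem pv_mem_le_join (sep t : List Char) :
    ∀ r : List (List Char), t ∈ r → t.length ≤ (PySem.Chars.join sep r).length := by
  intro r
  induction r with
  | nil => simp
  | cons a rest ih =>
    intro ht
    cases rest with
    | nil =>
      rw [PySem.Chars.join_singleton]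
      rcases List.mem_singleton.mp ht with rfl; exact le_rfl
    | cons b rs =>
      rw [PySem.Chars.join_cons_cons]
      rcases List.mem_cons.mp ht with rfl | hmem
      · simp
      · have := ih hmem; simp only [List.length_append]; omega

theorem pv_two_le_facts (sep : List Char) (r : List (List Char)) (hsep : sep ≠ [])
    (h2 : 2 ≤ r.length) :
    (r.map List.length).sum < (PySem.Chars.join sep r).length ∧
    ∀ t ∈ r, t.length < (PySem.Chars.join sep r).length := by
  have hs1 : 1 ≤ sep.length := by
    cases sep with | nil => exact absurd rfl hsep | cons a b => simp
  match r, h2 with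
  | a :: b :: rs, _ =>
    rw [PySem.Chars.join_cons_cons]
    have hsum := pv_sumLen_le_join sep (b :: rs)
    constructor
    · simp only [List.map_cons, List.sum_cons, List.length_append] at hsum ⊢
      omega
    · intro t ht
      rcases List.mem_cons.mp ht with rfl | hmem
      · have := pv_sumLen_le_join sep (b :: rs)
        simp only [List.length_append]; omega
      · have := pv_mem_le_join sep t (b :: rs) hmem
        simp only [List.length_append]; omega

theorem pv_splitOn_not_infix (s sep : List Char) (hsep : sep ≠ []) (h : ¬ sep <:+: s) :
    PySem.Chars.splitOn s sep = [s] := by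
  obtain ⟨hne, hj, _⟩ := pv_splitOn_spec s sep hsep
  rcases hr : PySem.Chars.splitOn s sep with _ | ⟨a, r'⟩
  · exact absurd hr hne
  · rcases r' with _ | ⟨b, rs⟩
    · rw [hr, PySem.Chars.join_singleton] at hj; rw [hj]
    · exfalso; apply h
      rw [hr, PySem.Chars.join_cons_cons] at hj
      exact ⟨a, PySem.Chars.join sep (b :: rs), by rw [← hj]⟩

theorem pv_cond_iff (s sep : List Char) (hsep : sep ≠ []) :
    (some s ≠ PySem.List.pyGet? (PySem.Chars.splitOn s sep) 0) ↔ sep <:+: s := by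
  constructor
  · intro h
    by_contra hc
    apply h
    rw [pv_splitOn_not_infix s sep hsep hc]
    simp [PySem.List.pyGet?, PySem.List.pyIdx?]
  · intro h hne
    obtain ⟨hnil, hj, hlen⟩ := pv_splitOn_spec s sep hsep
    have h2 := hlen h
    rcases hr : PySem.Chars.splitOn s sep with _ | ⟨a, r'⟩
    · exact absurd hr hnil
    · rw [hr] at hne h2 hj
      have hsa : s = a := by
        simpa [PySem.List.pyGet?, PySem.List.pyIdx?] using hne
      have hlt := (pv_two_le_facts sep (a :: r') hsep h2).2 a (by simp)
      rw [hj, ← hsa] at hlt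
      omega

def pvSplitArtist (artist : List Char) : List (List Char) :=
  if some artist ≠ PySem.List.pyGet? (PySem.Chars.splitOn artist " feat. ".toList) 0 then
    PySem.Chars.splitOn artist " feat. ".toList
  else if some artist ≠ PySem.List.pyGet? (PySem.Chars.splitOn artist ", ".toList) 0 then
    PySem.Chars.splitOn artist ", ".toList
  else if some artist ≠ PySem.List.pyGet? (PySem.Chars.splitOn artist " or ".toList) 0 then
    PySem.Chars.splitOn artist " or ".toList
  else
    PySem.Chars.splitOn artist " and ".toList

def pvTotalLen (xs : List (List Char)) : Nat := (xs.map List.length).sum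

theorem pvSplitArtist_spec (a : List Char) :
    pvSplitArtist a = [a] ∨
    (2 ≤ (pvSplitArtist a).length ∧ pvTotalLen (pvSplitArtist a) < a.length) := by
  have key : ∀ sep : List Char, sep ≠ [] → sep <:+: a →
      2 ≤ (PySem.Chars.splitOn a sep).length ∧
      pvTotalLen (PySem.Chars.splitOn a sep) < a.length := by
    intro sep hsep hin
    obtain ⟨_, hj, hlen⟩ := pv_splitOn_spec a sep hsep
    have h2 := hlen hin
    have := (pv_two_le_facts sep (PySem.Chars.splitOn a sep) hsep h2).1
    rw [hj] at this
    exact ⟨h2, this⟩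
  unfold pvSplitArtist
  split_ifs with h1 h2 h3
  · exact Or.inr (key _ (by decide) ((pv_cond_iff a _ (by decide)).mp h1))
  · exact Or.inr (key _ (by decide) ((pv_cond_iff a _ (by decide)).mp h2))
  · exact Or.inr (key _ (by decide) ((pv_cond_iff a _ (by decide)).mp h3))
  · by_cases h4 : " and ".toList <:+: a
    · exact Or.inr (key _ (by decide) h4)
    · exact Or.inl (pv_splitOn_not_infix a _ (by decide) h4)

def pvExpandA (artist_array : List (List Char)) : List (List Char) :=
  artist_array.foldl (fun new_array a =>
    (pvSplitArtist a).foldl (fun new_array n => new_array ++ [n]) new_array) []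

theorem pvExpandA_eq_flatMap (xs : List (List Char)) :
    pvExpandA xs = xs.flatMap pvSplitArtist := by
  unfold pvExpandA
  simp only [PySem.List.foldl_append_singleton]
  simpa using PySem.List.foldl_append_eq_flatMap pvSplitArtist xs []

theorem pv_flat_le (xs : List (List Char)) :
    pvTotalLen (xs.flatMap pvSplitArtist) ≤ pvTotalLen xs := by
  induction xs with
  | nil => simp [pvTotalLen]
  | cons a t ih =>
    have ha : pvTotalLen (pvSplitArtist a) ≤ a.length := by
      rcases pvSplitArtist_spec a with h | ⟨_, h⟩
      · rw [h]; simp [pvTotalLen]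
      · omega
    simp only [List.flatMap_cons, pvTotalLen, List.map_append, List.sum_append,
      List.map_cons, List.sum_cons] at *
    omega

theorem pvExpandA_dec (xs : List (List Char)) :
    pvExpandA xs = xs ∨ pvTotalLen (pvExpandA xs) < pvTotalLen xs := by
  rw [pvExpandA_eq_flatMap]
  induction xs with
  | nil => exact Or.inl rfl
  | cons a t ih =>
    rcases pvSplitArtist_spec a with ha | ⟨_, ha⟩
    · rcases ih with ht | ht
      · exact Or.inl (by rw [List.flatMap_cons, ha, ht]; rfl)
      · refine Or.inr ?_
        rw [List.flatMap_cons, ha]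
        simp only [pvTotalLen, List.map_cons, List.sum_cons, List.singleton_append] at ht ⊢
        omega
    · refine Or.inr ?_
      have := pv_flat_le t
      rw [List.flatMap_cons]
      simp only [pvTotalLen, List.map_cons, List.sum_cons, List.map_append,
        List.sum_append] at this ha ⊢
      omega

def splitLoopGo (new_array : List (List Char)) (len_old len_new : Nat) : List (List Char) :=
  if len_old ≠ len_new then
    splitLoopGo (pvExpandA new_array) new_array.length (pvExpandA new_array).length
  else new_array
termination_by 2 * pvTotalLen new_array + (if len_old = len_new then 0 else 1)
decreasing_by
  rcases pvExpandA_dec new_array with h | h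
  · rw [h]
    have hne : ¬ len_old = len_new := by assumption
    simp [hne]
  · split_ifs <;> omega

def split_loop (artist_array : List String) : List String :=
  (splitLoopGo (artist_array.map String.toList) artist_array.length 0).map String.ofList

-- ===== PORT B =====
-- B-side helpers (transliteration of Source B): a LIFO worklist; the top element is split at the
-- first occurrence of the first delimiter it contains, or emitted to the output if it has none.
-- Python builds `stack = list(reversed(artist_array))` and pops from the END; the Lean stack
-- keeps its top at the FRONT, so it starts as artist_array in order.
-- pvPick_bounds is cited by pvGoB's termination proof, so it stays above the port.

def pvSeps : List (List Char) := [" feat. ".toList, ", ".toList, " or ".toList, " and ".toList]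

def pvPick : List (List Char) → List Char → Option (Int × Nat)
  | [], _ => none
  | sep :: rest, s =>
      let i := PySem.Chars.find s sep
      if i ≠ -1 then some (i, sep.length) else pvPick rest s

theorem pvPick_bounds : ∀ (seps : List (List Char)) (s : List Char) (i : Int) (n : Nat),
    (∀ sep ∈ seps, 2 ≤ sep.length) → pvPick seps s = some (i, n) →
    0 ≤ i ∧ 2 ≤ n ∧ i.toNat + n ≤ s.length := by
  intro seps
  induction seps with
  | nil => intro s i n _ h; simp [pvPick] at h
  | cons sep rest ih =>
    intro s i n hlen h
    simp only [pvPick] at h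
    by_cases hf : PySem.Chars.find s sep ≠ -1
    · rw [if_pos hf] at h
      obtain ⟨rfl, rfl⟩ : PySem.Chars.find s sep = i ∧ sep.length = n := by
        simpa [Prod.ext_iff] using h
      have h0 : (0 : Int) ≤ PySem.Chars.find s sep :=
        (PySem.Chars.find_nonneg_iff s sep).mpr ((PySem.Chars.find_ne_neg_one_iff s sep).mp hf)
      obtain ⟨-, hpre, -⟩ := PySem.Chars.findFrom_natCast_spec s sep 0 (by simp)
        (by simpa [PySem.Chars.findFrom_zero] using hf)
      simp only [Nat.cast_zero, PySem.Chars.findFrom_zero] at hpre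
      have hle := hpre.length_le
      rw [List.length_drop] at hle
      have h2 := hlen sep (by simp)
      refine ⟨h0, h2, by omega⟩
    · rw [if_neg hf] at h
      exact ih s i n (fun q hq => hlen q (by simp [hq])) h

def pvMeasure (stack : List (List Char)) : Nat := (stack.map (fun s => 2 * s.length + 1)).sum

def pvGoB (stack out : List (List Char)) : List (List Char) :=
  match stack with
  | [] => out
  | s :: rest =>
    match hp : pvPick pvSeps s with
    | some (i, n) =>
        pvGoB (PySem.List.slice s none (some i) ::
               PySem.List.slice s (some (i + (n : Int))) none :: rest) out
    | none => pvGoB rest (out ++ [s])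
termination_by pvMeasure stack
decreasing_by
  · obtain ⟨h0, h2, h3⟩ := pvPick_bounds pvSeps s i n (by decide) hp
    rw [PySem.List.slice_to s h0, PySem.List.slice_from s (by omega)]
    simp only [pvMeasure, List.map_cons, List.sum_cons, List.length_take, List.length_drop]
    have : (i + (n : Int)).toNat = i.toNat + n := by omega
    rw [this]
    omega
  · simp only [pvMeasure, List.map_cons, List.sum_cons]
    omega

def split_loop_alt (artist_array : List String) : List String :=
  (pvGoB (artist_array.map String.toList) []).map String.ofList

-- ===== PRECONDITION & SPEC =====
def Spec_split_loop (artist_array : List String) (out : List String) : Prop := out = split_loop_alt artist_array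
instance (artist_array : List String) (out : List String) : Decidable (Spec_split_loop artist_array out) := by unfold Spec_split_loop; infer_instance

-- ===== CLAIM (what is proved, stated in full; the proofs are below) =====
def Claim_equal_split_loop : Prop := ∀ (artist_array : List String), Dom_split_loop artist_array → Spec_split_loop artist_array (split_loop artist_array)

-- ===== LEMMAS AND PROOFS =====

-- The common abstraction both ports are reduced to: full expansion of a single name by the
-- priority rule (proof-layer only; neither port computes with it).

def pvParts (s : List Char) : List (List Char) :=
  if PySem.Chars.isIn " feat. ".toList s then PySem.Chars.splitOn s " feat. ".toList
  else if PySem.Chars.isIn ", ".toList s then PySem.Chars.splitOn s ", ".toList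
  else if PySem.Chars.isIn " or ".toList s then PySem.Chars.splitOn s " or ".toList
  else PySem.Chars.splitOn s " and ".toList

theorem pvParts_mem_lt (s : List Char) (h : ¬ (pvParts s).length = 1) :
    ∀ p ∈ pvParts s, p.length < s.length := by
  have key : ∀ sep : List Char, sep ≠ [] → ¬ (PySem.Chars.splitOn s sep).length = 1 →
      ∀ p ∈ PySem.Chars.splitOn s sep, p.length < s.length := by
    intro sep hsep hne p hp
    obtain ⟨hnil, hj, _⟩ := pv_splitOn_spec s sep hsep
    have h2 : 2 ≤ (PySem.Chars.splitOn s sep).length := by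
      rcases hr : PySem.Chars.splitOn s sep with _ | ⟨a, r'⟩
      · exact absurd hr hnil
      · rw [hr] at hne; simp only [List.length_cons] at hne ⊢; omega
    have := (pv_two_le_facts sep (PySem.Chars.splitOn s sep) hsep h2).2 p hp
    rwa [hj] at this
  unfold pvParts at h ⊢
  split_ifs at h ⊢ <;> exact key _ (by decide) h

def pvExpandB (s : List Char) : List (List Char) :=
  if (pvParts s).length = 1 then [s]
  else (pvParts s).attach.flatMap (fun p => pvExpandB p.1)
termination_by s.length
decreasing_by
  exact pvParts_mem_lt s (by assumption) p.1 p.2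

theorem pv_splitOn_len_one (s sep : List Char) (hsep : sep ≠ [])
    (h : (PySem.Chars.splitOn s sep).length = 1) : PySem.Chars.splitOn s sep = [s] := by
  obtain ⟨hne, hj, _⟩ := pv_splitOn_spec s sep hsep
  rcases hr : PySem.Chars.splitOn s sep with _ | ⟨a, r'⟩
  · exact absurd hr hne
  · rcases r' with _ | ⟨b, rs⟩
    · rw [hr, PySem.Chars.join_singleton] at hj; rw [hj]
    · rw [hr] at h; simp at h

theorem pv_not_isIn (sub s : List Char) (h : ¬ sub <:+: s) :
    ¬ (PySem.Chars.isIn sub s = true) := by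
  simp [PySem.Chars.isIn_eq_false_iff, h]

theorem pvSplitArtist_eq_pvParts (a : List Char) : pvSplitArtist a = pvParts a := by
  have E : ∀ sep : List Char, sep ≠ [] →
      ((some a ≠ PySem.List.pyGet? (PySem.Chars.splitOn a sep) 0) ↔
        PySem.Chars.isIn sep a = true) := fun sep hs =>
    (pv_cond_iff a sep hs).trans (PySem.Chars.isIn_iff_infix sep a).symm
  unfold pvSplitArtist pvParts
  rw [if_congr (E _ (by decide)) rfl
      (if_congr (E _ (by decide)) rfl
        (if_congr (E _ (by decide)) rfl rfl))]

theorem pvExpandB_eq (s : List Char) :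
    pvExpandB s = if (pvParts s).length = 1 then [s] else (pvParts s).flatMap pvExpandB := by
  rw [pvExpandB]
  by_cases h : (pvParts s).length = 1
  · rw [if_pos h, if_pos h]
  · rw [if_neg h, if_neg h]
    conv_rhs => rw [← List.attach_map_subtype_val (pvParts s)]
    rw [List.flatMap_map]

theorem pvParts_len_one (s : List Char) (h : (pvParts s).length = 1) : pvParts s = [s] := by
  unfold pvParts at h ⊢
  split_ifs at h ⊢ <;> exact pv_splitOn_len_one s _ (by decide) h

theorem pv_flat_parts (s : List Char) : (pvParts s).flatMap pvExpandB = pvExpandB s := by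
  by_cases h : (pvParts s).length = 1
  · rw [pvParts_len_one s h, pvExpandB_eq s, if_pos h]
    simp [pvExpandB_eq s, pvParts_len_one s h]
  · rw [pvExpandB_eq s, if_neg h]

theorem pv_inv (xs : List (List Char)) :
    (xs.flatMap pvSplitArtist).flatMap pvExpandB = xs.flatMap pvExpandB := by
  rw [List.flatMap_assoc]
  simp only [pvSplitArtist_eq_pvParts, pv_flat_parts]

theorem pv_len_le (xs : List (List Char)) :
    xs.length ≤ (xs.flatMap pvSplitArtist).length := by
  induction xs with
  | nil => simp
  | cons a t ih =>
    have ha : 1 ≤ (pvSplitArtist a).length := by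
      rcases pvSplitArtist_spec a with h | ⟨h, _⟩
      · rw [h]; simp
      · omega
    simp only [List.flatMap_cons, List.length_append, List.length_cons]
    omega

theorem pv_stable (xs : List (List Char))
    (h : xs.length = (xs.flatMap pvSplitArtist).length) :
    ∀ a ∈ xs, pvSplitArtist a = [a] := by
  induction xs with
  | nil => simp
  | cons a t ih =>
    have ha : 1 ≤ (pvSplitArtist a).length := by
      rcases pvSplitArtist_spec a with h' | ⟨h', _⟩
      · rw [h']; simp
      · omega
    have ht := pv_len_le t
    simp only [List.flatMap_cons, List.length_append, List.length_cons] at h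
    have ha1 : (pvSplitArtist a).length = 1 := by omega
    have haa : pvSplitArtist a = [a] := by
      rcases pvSplitArtist_spec a with h' | ⟨h', _⟩
      · exact h'
      · omega
    intro b hb
    rcases List.mem_cons.mp hb with rfl | hmem
    · exact haa
    · exact ih (by omega) b hmem

theorem pv_fixed (xs : List (List Char)) (h : ∀ a ∈ xs, pvSplitArtist a = [a]) :
    xs.flatMap pvSplitArtist = xs := by
  induction xs with
  | nil => rfl
  | cons a t ih =>
    rw [List.flatMap_cons, h a (by simp), ih (fun b hb => h b (by simp [hb]))]
    rfl

theorem pv_done (xs : List (List Char)) (h : ∀ a ∈ xs, pvSplitArtist a = [a]) :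
    xs.flatMap pvExpandB = xs := by
  induction xs with
  | nil => rfl
  | cons a t ih =>
    have ha : pvExpandB a = [a] := by
      rw [pvExpandB_eq a, if_pos (by rw [← pvSplitArtist_eq_pvParts, h a (by simp)]; rfl)]
    rw [List.flatMap_cons, ha, ih (fun b hb => h b (by simp [hb]))]
    rfl

theorem pv_go_correct : ∀ (n : Nat) (xs : List (List Char)), pvTotalLen xs = n →
    splitLoopGo (pvExpandA xs) xs.length (pvExpandA xs).length = xs.flatMap pvExpandB := by
  intro n
  induction n using Nat.strong_induction_on with
  | _ n ih =>
    intro xs hn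
    rw [splitLoopGo]
    by_cases h : xs.length = (pvExpandA xs).length
    · rw [if_neg (by simpa using h)]
      have hst := pv_stable xs (by rwa [pvExpandA_eq_flatMap] at h)
      rw [pvExpandA_eq_flatMap, pv_fixed xs hst]
      exact (pv_done xs hst).symm
    · rw [if_pos h]
      have hdec : pvTotalLen (pvExpandA xs) < n := by
        rcases pvExpandA_dec xs with he | he
        · exact absurd (by rw [he]) h
        · omega
      rw [ih _ hdec (pvExpandA xs) rfl, pvExpandA_eq_flatMap, pv_inv]

-- splitOn decomposes at the FIRST occurrence of sep.

theorem pv_go_acc (sep : List Char) :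
    ∀ (fuel : Nat) (l cur : List Char) (acc : List (List Char)),
    PySem.Chars.splitOn.go sep fuel l cur acc =
      acc.reverse ++ PySem.Chars.splitOn.go sep fuel l cur [] := by
  intro fuel
  induction fuel with
  | zero =>
    intro l cur acc
    rw [PySem.Chars.splitOn.go.eq_def]
    rw [PySem.Chars.splitOn.go.eq_def]
    simp
  | succ fuel ih =>
    intro l cur acc
    cases l with
    | nil =>
      rw [PySem.Chars.splitOn.go.eq_def]
      rw [PySem.Chars.splitOn.go.eq_def]
      simp
    | cons c rest =>
      rw [PySem.Chars.splitOn.go.eq_def]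
      conv_rhs => rw [PySem.Chars.splitOn.go.eq_def]
      by_cases hp : sep.isPrefixOf (c :: rest) = true
      · simp only [hp, if_true]
        rw [ih (List.drop sep.length (c :: rest)) [] (cur.reverse :: acc),
            ih (List.drop sep.length (c :: rest)) [] [cur.reverse]]
        simp
      · simp only [hp]
        exact ih rest (c :: cur) acc

theorem pv_go_fuel (sep : List Char) (hsep : sep ≠ []) :
    ∀ (fuel fuel' : Nat) (l cur : List Char), l.length < fuel → l.length < fuel' →
    PySem.Chars.splitOn.go sep fuel l cur [] = PySem.Chars.splitOn.go sep fuel' l cur [] := by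
  intro fuel
  induction fuel with
  | zero => intro fuel' l cur h; omega
  | succ fuel ih =>
    intro fuel' l cur h h'
    cases fuel' with
    | zero => omega
    | succ fuel' =>
      cases l with
      | nil =>
        rw [PySem.Chars.splitOn.go.eq_def]
        rw [PySem.Chars.splitOn.go.eq_def]
      | cons c rest =>
        have hs1 : 1 ≤ sep.length := by
          cases sep with | nil => exact absurd rfl hsep | cons a b => simp
        rw [PySem.Chars.splitOn.go.eq_def]
        conv_rhs => rw [PySem.Chars.splitOn.go.eq_def]
        by_cases hp : sep.isPrefixOf (c :: rest) = true
        · simp only [hp, if_true]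
          rw [pv_go_acc sep fuel, pv_go_acc sep fuel']
          have hd : (List.drop sep.length (c :: rest)).length < fuel := by
            simp only [List.length_drop, List.length_cons]
            simp only [List.length_cons] at h; omega
          have hd' : (List.drop sep.length (c :: rest)).length < fuel' := by
            simp only [List.length_drop, List.length_cons]
            simp only [List.length_cons] at h'; omega
          rw [ih fuel' (List.drop sep.length (c :: rest)) [] hd hd']
        · simp only [hp]
          exact ih fuel' rest (c :: cur)
            (by simp only [List.length_cons] at h; omega)
            (by simp only [List.length_cons] at h'; omega)

theorem pv_go_first (sep : List Char) (hsep : sep ≠ []) :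
    ∀ (i : Nat) (fuel : Nat) (l cur : List Char) (acc : List (List Char)), l.length < fuel →
    sep <+: l.drop i → (∀ j, j < i → ¬ sep <+: l.drop j) →
    PySem.Chars.splitOn.go sep fuel l cur acc =
      acc.reverse ++ (cur.reverse ++ l.take i) ::
        PySem.Chars.splitOn (l.drop (i + sep.length)) sep := by
  intro i
  induction i with
  | zero =>
    intro fuel l cur acc hf hpre _
    cases fuel with
    | zero => omega
    | succ fuel =>
      cases l with
      | nil =>
        exfalso
        simp only [List.drop_nil] at hpre
        exact hsep (List.prefix_nil.mp hpre)
      | cons c rest =>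
        rw [PySem.Chars.splitOn.go.eq_def]
        have hp : sep.isPrefixOf (c :: rest) = true :=
          List.isPrefixOf_iff_prefix.mpr (by simpa using hpre)
        simp only [hp, if_true]
        rw [pv_go_acc sep fuel]
        have hs1 : 1 ≤ sep.length := by
          cases sep with | nil => exact absurd rfl hsep | cons a b => simp
        have hd : (List.drop sep.length (c :: rest)).length < fuel := by
          simp only [List.length_drop, List.length_cons]
          simp only [List.length_cons] at hf; omega
        rw [pv_go_fuel sep hsep fuel ((List.drop sep.length (c :: rest)).length + 1)
          (List.drop sep.length (c :: rest)) [] hd (by omega)]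
        unfold PySem.Chars.splitOn
        simp
  | succ k ih =>
    intro fuel l cur acc hf hpre hmin
    cases fuel with
    | zero => omega
    | succ fuel =>
      cases l with
      | nil =>
        exfalso
        simp only [List.drop_nil] at hpre
        exact hsep (List.prefix_nil.mp hpre)
      | cons c rest =>
        rw [PySem.Chars.splitOn.go.eq_def]
        have hp : ¬ sep.isPrefixOf (c :: rest) = true := by
          intro hcon
          exact hmin 0 (by omega) (by simpa using List.isPrefixOf_iff_prefix.mp hcon)
        simp only [hp]
        rw [ih fuel rest (c :: cur) acc
          (by simp only [List.length_cons] at hf; omega)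
          (by simpa using hpre)
          (fun j hj => hmin (j + 1) (by omega))]
        simp only [List.reverse_cons, List.append_assoc]
        have h1 : [c] ++ rest.take k = (c :: rest).take (k + 1) := by simp
        have h2 : rest.drop (k + sep.length) = (c :: rest).drop (k + 1 + sep.length) := by
          have : k + 1 + sep.length = (k + sep.length) + 1 := by omega
          rw [this]
          simp
        rw [← h2, ← h1]
        simp

theorem pv_splitOn_first (s sep : List Char) (hsep : sep ≠ []) (i : Nat)
    (hpre : sep <+: s.drop i) (hmin : ∀ j, j < i → ¬ sep <+: s.drop j) :
    PySem.Chars.splitOn s sep =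
      s.take i :: PySem.Chars.splitOn (s.drop (i + sep.length)) sep := by
  conv_lhs => rw [PySem.Chars.splitOn,
    pv_go_first sep hsep i (s.length + 1) s [] [] (by omega) hpre hmin]
  simp

-- a splitOn-tail of a string expands to the concatenation of its parts' expansions,
-- provided pvParts still picks sep whenever sep occurs in the tail

theorem pv_flat_splitOn (t sep : List Char) (hsep : sep ≠ [])
    (hparts : sep <:+: t → pvParts t = PySem.Chars.splitOn t sep) :
    (PySem.Chars.splitOn t sep).flatMap pvExpandB = pvExpandB t := by
  by_cases hin : sep <:+: t
  · rw [← hparts hin]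
    exact pv_flat_parts t
  · rw [pv_splitOn_not_infix t sep hsep hin]
    simp

-- the worklist step agrees with full expansion

theorem pv_split_step (s : List Char) (i : Int) (n : Nat)
    (hp : pvPick pvSeps s = some (i, n)) :
    pvExpandB s = pvExpandB (s.take i.toNat) ++ pvExpandB (s.drop (i.toNat + n)) := by
  have key : ∀ sep : List Char, sep ≠ [] →
      PySem.Chars.find s sep = i → sep.length = n →
      pvParts s = PySem.Chars.splitOn s sep →
      (∀ t, t <:+: s → sep <:+: t → pvParts t = PySem.Chars.splitOn t sep) →
      pvExpandB s = pvExpandB (s.take i.toNat) ++ pvExpandB (s.drop (i.toNat + n)) := by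
    intro sep hsep hfind hn hps htail
    have hne2 : PySem.Chars.find s sep ≠ -1 := by
      rw [hfind]
      intro hcon
      obtain ⟨h0, -, -⟩ := pvPick_bounds pvSeps s i n (by decide) hp
      omega
    obtain ⟨-, hpre, hmin⟩ := PySem.Chars.findFrom_natCast_spec s sep 0 (by simp)
      (by simpa [PySem.Chars.findFrom_zero] using hne2)
    simp only [Nat.cast_zero, PySem.Chars.findFrom_zero] at hpre hmin
    rw [hfind] at hpre hmin
    have hfirst := pv_splitOn_first s sep hsep i.toNat hpre
      (fun j hj => hmin j (by omega) hj)
    rw [hn] at hfirst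
    calc pvExpandB s = (pvParts s).flatMap pvExpandB := (pv_flat_parts s).symm
      _ = (PySem.Chars.splitOn s sep).flatMap pvExpandB := by rw [hps]
      _ = pvExpandB (s.take i.toNat) ++ pvExpandB (s.drop (i.toNat + n)) := by
          rw [hfirst, List.flatMap_cons]
          congr 1
          exact pv_flat_splitOn (s.drop (i.toNat + n)) sep hsep
            (htail (s.drop (i.toNat + n)) (List.drop_suffix _ _).isInfix)
  -- unfold pvPick's four tries
  simp only [pvSeps, pvPick] at hp
  by_cases h1 : PySem.Chars.find s " feat. ".toList ≠ -1
  · rw [if_pos h1] at hp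
    obtain ⟨hf, hn⟩ : PySem.Chars.find s " feat. ".toList = i ∧ (" feat. ".toList).length = n := by
      simpa [Prod.ext_iff] using hp
    have hin1 : " feat. ".toList <:+: s := (PySem.Chars.find_ne_neg_one_iff _ _).mp h1
    refine key _ (by decide) hf hn ?_ ?_
    · unfold pvParts
      rw [if_pos ((PySem.Chars.isIn_iff_infix _ _).mpr hin1)]
    · intro t _ ht
      unfold pvParts
      by_cases hi : PySem.Chars.isIn " feat. ".toList t = true
      · rw [if_pos hi]
      · exact absurd ((PySem.Chars.isIn_iff_infix _ _).mpr ht) hi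
  · rw [if_neg h1] at hp
    have hni1 : ¬ " feat. ".toList <:+: s := by
      intro hcon; exact h1 ((PySem.Chars.find_ne_neg_one_iff _ _).mpr hcon)
    by_cases h2 : PySem.Chars.find s ", ".toList ≠ -1
    · rw [if_pos h2] at hp
      obtain ⟨hf, hn⟩ : PySem.Chars.find s ", ".toList = i ∧ (", ".toList).length = n := by
        simpa [Prod.ext_iff] using hp
      have hin2 : ", ".toList <:+: s := (PySem.Chars.find_ne_neg_one_iff _ _).mp h2
      refine key _ (by decide) hf hn ?_ ?_
      · unfold pvParts
        rw [if_neg (pv_not_isIn _ _ hni1),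
            if_pos ((PySem.Chars.isIn_iff_infix _ _).mpr hin2)]
      · intro t hts ht
        unfold pvParts
        rw [if_neg (pv_not_isIn _ _ (fun hcon => hni1 (hcon.trans hts))),
            if_pos ((PySem.Chars.isIn_iff_infix _ _).mpr ht)]
    · rw [if_neg h2] at hp
      have hni2 : ¬ ", ".toList <:+: s := by
        intro hcon; exact h2 ((PySem.Chars.find_ne_neg_one_iff _ _).mpr hcon)
      by_cases h3 : PySem.Chars.find s " or ".toList ≠ -1
      · rw [if_pos h3] at hp
        obtain ⟨hf, hn⟩ : PySem.Chars.find s " or ".toList = i ∧ (" or ".toList).length = n := by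
          simpa [Prod.ext_iff] using hp
        have hin3 : " or ".toList <:+: s := (PySem.Chars.find_ne_neg_one_iff _ _).mp h3
        refine key _ (by decide) hf hn ?_ ?_
        · unfold pvParts
          rw [if_neg (pv_not_isIn _ _ hni1),
              if_neg (pv_not_isIn _ _ hni2),
              if_pos ((PySem.Chars.isIn_iff_infix _ _).mpr hin3)]
        · intro t hts ht
          unfold pvParts
          rw [if_neg (pv_not_isIn _ _ (fun hcon => hni1 (hcon.trans hts))),
              if_neg (pv_not_isIn _ _ (fun hcon => hni2 (hcon.trans hts))),
              if_pos ((PySem.Chars.isIn_iff_infix _ _).mpr ht)]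
      · rw [if_neg h3] at hp
        have hni3 : ¬ " or ".toList <:+: s := by
          intro hcon; exact h3 ((PySem.Chars.find_ne_neg_one_iff _ _).mpr hcon)
        by_cases h4 : PySem.Chars.find s " and ".toList ≠ -1
        · rw [if_pos h4] at hp
          obtain ⟨hf, hn⟩ :
              PySem.Chars.find s " and ".toList = i ∧ (" and ".toList).length = n := by
            simpa [Prod.ext_iff] using hp
          refine key _ (by decide) hf hn ?_ ?_
          · unfold pvParts
            rw [if_neg (pv_not_isIn _ _ hni1),
                if_neg (pv_not_isIn _ _ hni2),
                if_neg (pv_not_isIn _ _ hni3)]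
          · intro t hts _
            unfold pvParts
            rw [if_neg (pv_not_isIn _ _ (fun hcon => hni1 (hcon.trans hts))),
                if_neg (pv_not_isIn _ _ (fun hcon => hni2 (hcon.trans hts))),
                if_neg (pv_not_isIn _ _ (fun hcon => hni3 (hcon.trans hts)))]
        · rw [if_neg h4] at hp
          simp at hp

theorem pv_emit_step (s : List Char) (hp : pvPick pvSeps s = none) :
    pvExpandB s = [s] := by
  simp only [pvSeps, pvPick] at hp
  by_cases h1 : PySem.Chars.find s " feat. ".toList ≠ -1
  · rw [if_pos h1] at hp; exact absurd hp (by simp)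
  · rw [if_neg h1] at hp
    by_cases h2 : PySem.Chars.find s ", ".toList ≠ -1
    · rw [if_pos h2] at hp; exact absurd hp (by simp)
    · rw [if_neg h2] at hp
      by_cases h3 : PySem.Chars.find s " or ".toList ≠ -1
      · rw [if_pos h3] at hp; exact absurd hp (by simp)
      · rw [if_neg h3] at hp
        by_cases h4 : PySem.Chars.find s " and ".toList ≠ -1
        · rw [if_pos h4] at hp; exact absurd hp (by simp)
        · have hps : pvParts s = [s] := by
            unfold pvParts
            rw [if_neg (pv_not_isIn _ _ (fun hcon => h1 ((PySem.Chars.find_ne_neg_one_iff _ _).mpr hcon))),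
                if_neg (pv_not_isIn _ _ (fun hcon => h2 ((PySem.Chars.find_ne_neg_one_iff _ _).mpr hcon))),
                if_neg (pv_not_isIn _ _ (fun hcon => h3 ((PySem.Chars.find_ne_neg_one_iff _ _).mpr hcon)))]
            exact pv_splitOn_not_infix s _ (by decide)
              (fun hcon => h4 ((PySem.Chars.find_ne_neg_one_iff _ _).mpr hcon))
          rw [pvExpandB_eq s, if_pos (by rw [hps]; rfl)]

theorem pvGoB_eq : ∀ (stack out : List (List Char)),
    pvGoB stack out = out ++ stack.flatMap pvExpandB := by
  intro stack out
  induction stack, out using pvGoB.induct with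
  | case1 out => simp [pvGoB]
  | case2 out s rest i n hp ih =>
    rw [pvGoB]
    split
    · rename_i i' n' heq
      have h2 : ((i, n) : Int × Nat) = (i', n') := by
        simpa using hp.symm.trans heq
      cases h2
      rw [ih]
      obtain ⟨h0, -, -⟩ := pvPick_bounds pvSeps s i n (by decide) hp
      rw [PySem.List.slice_to s h0, PySem.List.slice_from s (by omega)]
      have : (i + (n : Int)).toNat = i.toNat + n := by omega
      rw [this]
      simp only [List.flatMap_cons, ← List.append_assoc]
      rw [pv_split_step s i n hp]
      simp [List.append_assoc]
    · rename_i heq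
      rw [hp] at heq
      simp at heq
  | case3 out s rest hp ih =>
    rw [pvGoB]
    split
    · rename_i i' n' heq
      rw [hp] at heq
      simp at heq
    · rw [ih, List.flatMap_cons, pv_emit_step s hp]
      simp

-- ===== VERDICT (by name: the statement is the Claim_ definition above) =====
theorem split_loop_spec : Claim_equal_split_loop := by
  unfold Claim_equal_split_loop Spec_split_loop
  intro arr _
  rw [split_loop, split_loop_alt, pvGoB_eq]
  cases arr with
  | nil =>
    rw [splitLoopGo]
    rfl
  | cons a t =>
    rw [splitLoopGo, if_pos (by simp : ((a :: t).length ≠ 0)),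
      pv_go_correct (pvTotalLen ((a :: t).map String.toList)) _ rfl]
    simp
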